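-- pv_equiv track=rewrite | github.com/omkarnarveer/Matrix-Chain-Multiplcation-Software-Simulation | app.py | generate_multiplication_steps
-- ===== SOURCE A (Python) =====
-- def generate_multiplication_steps(s, matrix_names, i, j):
--     """
--     Recursively generate the multiplication steps (addresses) for the optimal order.
--     """
--     if i == j:
--         return [matrix_names[i]]
--     else:
--         k = s[i][j]
--         left_order = generate_multiplication_steps(s, matrix_names, i, k)
--         right_order = generate_multiplication_steps(s, matrix_names, k + 1, j)
--         return left_order + right_order
-- ===== SOURCE B (Python) =====
-- def generate_multiplication_steps(s, matrix_names, i, j):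
--     # Phase 1: expand intervals with an explicit worklist into the left-to-right
--     # sequence of leaf matrix indices (never touching matrix_names).
--     indices = []
--     stack = [(i, j)]
--     while stack:
--         a, b = stack.pop()
--         if a == b:
--             indices.append(a)
--         else:
--             k = s[a][b]
--             stack.append((k + 1, b))
--             stack.append((a, k))
--     # Phase 2: resolve the collected indices to names in one separate pass.
--     return [matrix_names[a] for a in indices]
-- ===== Notes on version B (the rewrite author's own statement) =====
-- stated objective: alternative
-- what changed: Replaces the binary recursion that concatenates name sublists with a two-phase computation: an explicit-worklist loop that first flattens the split table into the left-to-right list of leaf indices, then a single separate pass mapping those indices to names.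
import Mathlib
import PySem

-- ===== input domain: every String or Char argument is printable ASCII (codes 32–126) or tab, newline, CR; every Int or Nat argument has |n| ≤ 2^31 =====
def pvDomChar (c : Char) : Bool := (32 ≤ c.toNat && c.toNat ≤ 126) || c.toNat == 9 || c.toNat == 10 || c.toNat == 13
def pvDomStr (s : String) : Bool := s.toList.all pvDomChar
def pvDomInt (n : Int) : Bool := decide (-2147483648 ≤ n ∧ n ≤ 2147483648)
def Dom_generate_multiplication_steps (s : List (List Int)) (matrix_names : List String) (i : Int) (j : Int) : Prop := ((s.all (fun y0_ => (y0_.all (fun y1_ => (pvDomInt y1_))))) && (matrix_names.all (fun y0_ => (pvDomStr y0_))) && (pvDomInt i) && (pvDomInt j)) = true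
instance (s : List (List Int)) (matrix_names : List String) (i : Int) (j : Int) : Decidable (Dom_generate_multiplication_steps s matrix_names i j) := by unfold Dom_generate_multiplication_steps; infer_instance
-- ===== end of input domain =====

-- B replaces A's binary recursion by a two-phase computation: a worklist loop flattening the split table into the leaf-index sequence, then one separate pass mapping indices to names; objective: alternative decomposition, same cost.


-- ===== PORT A =====
-- A's recursion ported with fuel ((j-i).toNat + 1 levels suffice on Pre_ inputs);
-- `none` marks IndexError / fuel exhaustion (Python: exception or unbounded recursion), excluded by Pre_.
def pvGoA (s : List (List Int)) (mn : List String) : Nat → Int → Int → Option (List String)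
  | 0, _, _ => none
  | f + 1, i, j =>
    if i == j then
      (PySem.List.pyGet? mn i).map (fun x => [x])
    else
      ((PySem.List.pyGet? s i).bind (fun r => PySem.List.pyGet? r j)).bind fun k =>
        (pvGoA s mn f i k).bind fun l =>
          (pvGoA s mn f (k + 1) j).map fun r => l ++ r

def generate_multiplication_steps (s : List (List Int)) (matrix_names : List String) (i : Int) (j : Int) : List String :=
  (pvGoA s matrix_names ((j - i).toNat + 1) i j).getD []

-- ===== PORT B =====
-- Phase 1 of Source B: the while-loop over the worklist, one fuel unit per pop
-- (2*(j-i).toNat + 1 pops suffice on Pre_ inputs); it collects leaf indices only.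
def pvLeafIdx (s : List (List Int)) : Nat → List (Int × Int) → List Int → Option (List Int)
  | _, [], acc => some acc
  | 0, _ :: _, _ => none
  | f + 1, (a, b) :: st, acc =>
    if a == b then
      pvLeafIdx s f st (acc ++ [a])
    else
      match (PySem.List.pyGet? s a).bind (fun r => PySem.List.pyGet? r b) with
      | none => none
      | some k => pvLeafIdx s f ((a, k) :: (k + 1, b) :: st) acc

-- Phase 2 of Source B: the list comprehension resolving indices to names.
def generate_multiplication_steps_alt (s : List (List Int)) (matrix_names : List String) (i : Int) (j : Int) : List String :=
  match pvLeafIdx s (2 * (j - i).toNat + 1) [(i, j)] [] with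
  | none => []
  | some idxs => (idxs.mapM (fun a => PySem.List.pyGet? matrix_names a)).getD []

-- ===== PRECONDITION & SPEC =====
-- the split entry s[p][q] exists and lies in [p, q)
def pvValidK (s : List (List Int)) (p q : Nat) : Bool :=
  match (PySem.List.pyGet? s (p : Int)).bind (fun r => PySem.List.pyGet? r (q : Int)) with
  | none => false
  | some k => decide ((p : Int) ≤ k ∧ k < (q : Int))

-- Pre_ admits the leaf calls i = j (including Python's in-range negative index) and the calls
-- 0 ≤ i ≤ j < len(matrix_names) on a well-formed split table (every reachable s[p][q] exists and lies in [p,q)).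
-- It excludes calls whose table drives the recursion out of [i,j) or through negative-index wraparound:
-- there A raises IndexError or recurses forever, and where it still returns, its value is a wraparound accident.
def Pre_generate_multiplication_steps (s : List (List Int)) (matrix_names : List String) (i : Int) (j : Int) : Prop :=
  (i = j ∧ PySem.Raise.InRange matrix_names.length i) ∨
  (0 ≤ i ∧ i ≤ j ∧ j < (matrix_names.length : Int) ∧
    ∀ p ∈ List.range matrix_names.length, ∀ q ∈ List.range matrix_names.length,
      i ≤ (p : Int) → (p : Int) < (q : Int) → (q : Int) ≤ j → pvValidK s p q = true)
instance (s : List (List Int)) (matrix_names : List String) (i : Int) (j : Int) : Decidable (Pre_generate_multiplication_steps s matrix_names i j) := by unfold Pre_generate_multiplication_steps; infer_instance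

def pvWitness_generate_multiplication_steps : List (List Int) × List String × Int × Int :=
  ([[0, 0, 1], [0, 0, 1], [0, 0, 0]], ["A", "B", "C"], 0, 2)

def Spec_generate_multiplication_steps (s : List (List Int)) (matrix_names : List String) (i : Int) (j : Int) (out : List String) : Prop := out = generate_multiplication_steps_alt s matrix_names i j
instance (s : List (List Int)) (matrix_names : List String) (i : Int) (j : Int) (out : List String) : Decidable (Spec_generate_multiplication_steps s matrix_names i j out) := by unfold Spec_generate_multiplication_steps; infer_instance

-- ===== CLAIM (what is proved, stated in full; the proofs are below) =====
def Claim_equal_generate_multiplication_steps : Prop := ∀ (s : List (List Int)) (matrix_names : List String) (i : Int) (j : Int), Dom_generate_multiplication_steps s matrix_names i j → Pre_generate_multiplication_steps s matrix_names i j → Spec_generate_multiplication_steps s matrix_names i j (generate_multiplication_steps s matrix_names i j)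

-- ===== LEMMAS AND PROOFS =====

lemma pvGoA_succ_eq (s : List (List Int)) (mn : List String) (f : Nat) (i j : Int) :
    pvGoA s mn (f + 1) i j =
      (if i == j then
        (PySem.List.pyGet? mn i).map (fun x => [x])
      else
        ((PySem.List.pyGet? s i).bind (fun r => PySem.List.pyGet? r j)).bind fun k =>
          (pvGoA s mn f i k).bind fun l =>
            (pvGoA s mn f (k + 1) j).map fun r => l ++ r) := rfl

lemma pvLeafIdx_succ_eq (s : List (List Int)) (f : Nat) (a b : Int)
    (st : List (Int × Int)) (acc : List Int) :
    pvLeafIdx s (f + 1) ((a, b) :: st) acc =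
      (if a == b then
        pvLeafIdx s f st (acc ++ [a])
      else
        match (PySem.List.pyGet? s a).bind (fun r => PySem.List.pyGet? r b) with
        | none => none
        | some k => pvLeafIdx s f ((a, k) :: (k + 1, b) :: st) acc) := rfl

lemma pvLeafIdx_nil (s : List (List Int)) (f : Nat) (acc : List Int) :
    pvLeafIdx s f [] acc = some acc := by cases f <;> rfl

-- the well-formed-table part of Pre_
def pvValid (s : List (List Int)) (mn : List String) (i j : Int) : Prop :=
  0 ≤ i ∧ i ≤ j ∧ j < (mn.length : Int) ∧
    ∀ p ∈ List.range mn.length, ∀ q ∈ List.range mn.length,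
      i ≤ (p : Int) → (p : Int) < (q : Int) → (q : Int) ≤ j → pvValidK s p q = true

lemma pvValid_sub {s : List (List Int)} {mn : List String} {i j i' j' : Int}
    (h : pvValid s mn i j) (h1 : i ≤ i') (h2 : i' ≤ j') (h3 : j' ≤ j) : pvValid s mn i' j' := by
  obtain ⟨hi, hij, hj, hk⟩ := h
  exact ⟨le_trans hi h1, h2, lt_of_le_of_lt h3 hj, fun p hp q hq hp1 hq1 hq2 =>
    hk p hp q hq (le_trans h1 hp1) hq1 (le_trans hq2 h3)⟩

lemma pvValid_k {s : List (List Int)} {mn : List String} {i j : Int}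
    (h : pvValid s mn i j) (hij : i < j) :
    ∃ k, (PySem.List.pyGet? s i).bind (fun r => PySem.List.pyGet? r j) = some k ∧ i ≤ k ∧ k < j := by
  obtain ⟨hi, _, hj, hk⟩ := h
  have hiN : (i.toNat : Int) = i := Int.toNat_of_nonneg hi
  have hjN : (j.toNat : Int) = j := Int.toNat_of_nonneg (by omega)
  have hv := hk i.toNat (by simp only [List.mem_range]; omega) j.toNat
    (by simp only [List.mem_range]; omega) (by omega) (by omega) (by omega)
  unfold pvValidK at hv
  rw [hiN, hjN] at hv
  revert hv
  cases hE : (PySem.List.pyGet? s i).bind (fun r => PySem.List.pyGet? r j) with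
  | none => intro hv; exact absurd hv (by simp)
  | some k => intro hv; exact ⟨k, rfl, by simpa using hv⟩

-- A's fuel is monotone
lemma pvGoA_mono (s : List (List Int)) (mn : List String) :
    ∀ f f' i j l, f ≤ f' → pvGoA s mn f i j = some l → pvGoA s mn f' i j = some l := by
  intro f
  induction f with
  | zero => intro f' i j l _ h; simp [pvGoA] at h
  | succ n ih =>
    intro f' i j l hle h
    obtain ⟨m, rfl⟩ : ∃ m, f' = m + 1 := ⟨f' - 1, by omega⟩
    rw [pvGoA_succ_eq] at h ⊢
    by_cases hij : i = j
    · simpa [hij] using h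
    · have hb : (i == j) = false := beq_eq_false_iff_ne.mpr hij
      simp only [hb, Bool.false_eq_true, if_false] at h ⊢
      cases hK : (PySem.List.pyGet? s i).bind (fun r => PySem.List.pyGet? r j) with
      | none => rw [hK] at h; exact absurd h (by simp)
      | some k =>
        rw [hK] at h
        simp only [Option.bind_some] at h ⊢
        cases hL : pvGoA s mn n i k with
        | none => rw [hL] at h; exact absurd h (by simp)
        | some l1 =>
          rw [hL] at h
          simp only [Option.bind_some] at h
          cases hR : pvGoA s mn n (k + 1) j with
          | none => rw [hR] at h; exact absurd h (by simp)
          | some l2 =>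
            rw [hR] at h
            rw [ih m i k l1 (by omega) hL]
            simp only [Option.bind_some]
            rw [ih m (k + 1) j l2 (by omega) hR]
            simpa using h

-- on a well-formed table, A terminates within fuel (j - i).toNat + 1
lemma pvGoA_total (s : List (List Int)) (mn : List String) :
    ∀ w i j, pvValid s mn i j → (j - i).toNat = w →
      ∃ l, pvGoA s mn (w + 1) i j = some l := by
  intro w
  induction w using Nat.strong_induction_on with
  | _ w ih =>
    intro i j hv hw
    by_cases hij : i = j
    · subst hij
      obtain ⟨hi, -, hj, -⟩ := hv
      refine ⟨[mn[i.toNat]'(by omega)], ?_⟩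
      rw [pvGoA_succ_eq, PySem.List.pyGet?_eq_some_getElem mn hi hj]
      simp
    · have hlt : i < j := lt_of_le_of_ne hv.2.1 hij
      obtain ⟨k, hK, hik, hkj⟩ := pvValid_k hv hlt
      obtain ⟨l1, hl1⟩ := ih (k - i).toNat (by omega) i k
        (pvValid_sub hv le_rfl hik (le_of_lt hkj)) rfl
      obtain ⟨l2, hl2⟩ := ih (j - (k + 1)).toNat (by omega) (k + 1) j
        (pvValid_sub hv (by omega) (by omega) le_rfl) rfl
      obtain ⟨m, rfl⟩ : ∃ m, w = m + 1 := ⟨w - 1, by omega⟩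
      refine ⟨l1 ++ l2, ?_⟩
      rw [pvGoA_succ_eq]
      have hb : (i == j) = false := beq_eq_false_iff_ne.mpr hij
      simp only [hb, Bool.false_eq_true, if_false, hK, Option.bind_some]
      rw [pvGoA_mono s mn _ (m + 1) _ _ _ (by omega) hl1]
      simp only [Option.bind_some]
      rw [pvGoA_mono s mn _ (m + 1) _ _ _ (by omega) hl2]
      rfl

-- the worklist loop flattens one interval into exactly the leaf indices whose
-- name lookups produce A's list for that interval
lemma pvLeafIdx_run (s : List (List Int)) (mn : List String) :
    ∀ w i j l, pvValid s mn i j ∨ i = j →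
      (j - i).toNat = w → pvGoA s mn (w + 1) i j = some l →
      ∃ idxs, idxs.mapM (fun a => PySem.List.pyGet? mn a) = some l ∧
        ∀ f st acc, pvLeafIdx s (2 * w + 1 + f) ((i, j) :: st) acc = pvLeafIdx s f st (acc ++ idxs) := by
  intro w
  induction w using Nat.strong_induction_on with
  | _ w ih =>
    intro i j l hv hw hA
    by_cases hij : i = j
    · subst hij
      rw [pvGoA_succ_eq] at hA
      simp only [beq_self_eq_true, if_true] at hA
      cases hx : PySem.List.pyGet? mn i with
      | none => rw [hx] at hA; exact absurd hA (by simp)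
      | some x =>
        rw [hx] at hA
        have hl : l = [x] := by simpa using hA.symm
        subst hl
        have hw0 : w = 0 := by omega
        subst hw0
        refine ⟨[i], by simp [List.mapM_cons, hx], ?_⟩
        intro f st acc
        rw [show 2 * 0 + 1 + f = f + 1 by omega, pvLeafIdx_succ_eq]
        simp
    · have hvv : pvValid s mn i j := by
        rcases hv with h | h
        · exact h
        · exact absurd h hij
      have hlt : i < j := lt_of_le_of_ne hvv.2.1 hij
      obtain ⟨m, rfl⟩ : ∃ m, w = m + 1 := ⟨w - 1, by omega⟩
      rw [pvGoA_succ_eq] at hA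
      have hb : (i == j) = false := beq_eq_false_iff_ne.mpr hij
      simp only [hb, Bool.false_eq_true, if_false] at hA
      obtain ⟨k, hK, hik, hkj⟩ := pvValid_k hvv hlt
      rw [hK] at hA
      simp only [Option.bind_some] at hA
      set w1 := (k - i).toNat with hw1
      set w2 := (j - (k + 1)).toNat with hw2
      have hvl : pvValid s mn i k := pvValid_sub hvv le_rfl hik (le_of_lt hkj)
      have hvr : pvValid s mn (k + 1) j := pvValid_sub hvv (by omega) (by omega) le_rfl
      obtain ⟨l1, hA1⟩ := pvGoA_total s mn w1 i k hvl rfl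
      obtain ⟨l2, hA2⟩ := pvGoA_total s mn w2 (k + 1) j hvr rfl
      have hL : pvGoA s mn (m + 1) i k = some l1 :=
        pvGoA_mono s mn _ (m + 1) _ _ _ (by omega) hA1
      have hR : pvGoA s mn (m + 1) (k + 1) j = some l2 :=
        pvGoA_mono s mn _ (m + 1) _ _ _ (by omega) hA2
      rw [hL] at hA
      simp only [Option.bind_some] at hA
      rw [hR] at hA
      have hl : l = l1 ++ l2 := by simpa using hA.symm
      subst hl
      obtain ⟨idxs1, hm1, hrun1⟩ := ih w1 (by omega) i k l1 (Or.inl hvl) rfl hA1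
      obtain ⟨idxs2, hm2, hrun2⟩ := ih w2 (by omega) (k + 1) j l2 (Or.inl hvr) rfl hA2
      refine ⟨idxs1 ++ idxs2, ?_, ?_⟩
      · rw [List.mapM_append, hm1, hm2]; rfl
      · intro f st acc
        rw [show 2 * (m + 1) + 1 + f = (2 * w1 + 1 + (2 * w2 + 1 + f)) + 1 by omega,
          pvLeafIdx_succ_eq]
        simp only [hb, Bool.false_eq_true, if_false, hK]
        rw [hrun1, hrun2, List.append_assoc]

-- ===== VERDICT (by name: the statement is the Claim_ definition above) =====
theorem generate_multiplication_steps_spec : Claim_equal_generate_multiplication_steps := by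
  intro s mn i j _ hpre
  unfold Spec_generate_multiplication_steps generate_multiplication_steps generate_multiplication_steps_alt
  rcases hpre with ⟨hij, hin⟩ | hv
  · subst hij
    have hne : PySem.List.pyGet? mn i ≠ none := by
      intro hnone
      exact (PySem.List.pyGet?_eq_none_iff mn i).mp hnone hin
    obtain ⟨x, hx⟩ := Option.ne_none_iff_exists'.mp hne
    have hA : pvGoA s mn ((i - i).toNat + 1) i i = some [x] := by
      rw [pvGoA_succ_eq]; simp [hx]
    obtain ⟨idxs, hm, hrun⟩ := pvLeafIdx_run s mn (i - i).toNat i i [x] (Or.inr rfl) rfl hA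
    rw [hA, show 2 * (i - i).toNat + 1 = 2 * (i - i).toNat + 1 + 0 by omega,
      hrun 0 [] [], pvLeafIdx_nil]
    simp [hm]
  · obtain ⟨l, hA⟩ := pvGoA_total s mn (j - i).toNat i j hv rfl
    obtain ⟨idxs, hm, hrun⟩ := pvLeafIdx_run s mn (j - i).toNat i j l (Or.inl hv) rfl hA
    rw [hA, show 2 * (j - i).toNat + 1 = 2 * (j - i).toNat + 1 + 0 by omega,
      hrun 0 [] [], pvLeafIdx_nil]
    simp [hm]
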